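-- pv_equiv track=rewrite | github.com/randypaul0821/arc-manager | services/bundle_service.py | _dedup_items
-- ===== SOURCE A (Python) =====
-- def _dedup_items(items: list) -> list:
--     """合并相同 item_id 的数量"""
--     merged = {}
--     for it in items:
--         iid = it["item_id"]
--         if iid in merged:
--             merged[iid]["quantity"] += it.get("quantity", 1)
--         else:
--             merged[iid] = {"item_id": iid, "quantity": it.get("quantity", 1)}
--     return list(merged.values())
-- ===== SOURCE B (Python) =====
-- def _dedup_items(items: list) -> list:
--     """合并相同 item_id 的数量"""
--     result = []
--     pending = list(items)
--     while pending:
--         iid = pending[0]["item_id"]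
--         qty = 0
--         rest = []
--         for it in pending:
--             if it["item_id"] == iid:
--                 qty += it.get("quantity", 1)
--             else:
--                 rest.append(it)
--         result.append({"item_id": iid, "quantity": qty})
--         pending = rest
--     return result
-- ===== Notes on version B (the rewrite author's own statement) =====
-- stated objective: alternative
-- what changed: B replaces A's single-pass dict aggregation by repeated group extraction: a while loop takes the id of the first pending item, sums and removes ALL occurrences of that id in one partition pass over the pending list, appends one output record, and repeats on the remainder; no dict is used at all.
-- outside the precondition, e.g. on _dedup_items([{'quantity': 2}]): A raises KeyError, B raises KeyError
import Mathlib
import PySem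

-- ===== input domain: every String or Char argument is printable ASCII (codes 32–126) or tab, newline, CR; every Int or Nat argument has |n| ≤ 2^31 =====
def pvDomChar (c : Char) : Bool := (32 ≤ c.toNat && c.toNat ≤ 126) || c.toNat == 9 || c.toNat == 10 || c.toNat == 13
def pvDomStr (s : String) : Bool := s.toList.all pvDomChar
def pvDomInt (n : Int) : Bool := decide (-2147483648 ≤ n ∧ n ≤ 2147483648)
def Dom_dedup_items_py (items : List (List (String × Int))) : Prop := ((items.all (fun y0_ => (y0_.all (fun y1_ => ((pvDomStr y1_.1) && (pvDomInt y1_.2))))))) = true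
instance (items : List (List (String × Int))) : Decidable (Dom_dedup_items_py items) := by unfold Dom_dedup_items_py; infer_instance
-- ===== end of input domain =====

-- B replaces A's dict aggregation by repeated group extraction: take the first pending id,
-- sum and remove ALL its occurrences in one partition pass, repeat on the remainder. Objective: alternative.

-- ===== PORT A =====
-- merged[iid]["quantity"] += q is d[k] = f(d[k]); the inner dict always has "quantity",
-- so Dict.modify with default 0 is exact here.
def dedup_items_py (items : List (List (String × Int))) : List (List (String × Int)) :=
  let merged : PySem.Dict Int (PySem.Dict String Int) :=
    items.foldl
      (fun m it =>
        match (PySem.Dict.mk it).get? "item_id" with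
        | none => m   -- KeyError in Python; excluded by Pre_
        | some iid =>
          if m.contains iid then
            m.modify iid PySem.Dict.empty
              (fun d => d.modify "quantity" 0 (· + (PySem.Dict.mk it).getD "quantity" 1))
          else
            m.insert iid
              (PySem.Dict.mk [("item_id", iid), ("quantity", (PySem.Dict.mk it).getD "quantity" 1)]))
      PySem.Dict.empty
  merged.values.map PySem.Dict.items

-- ===== PORT B =====
-- the body of B's inner `for it in pending` loop: accumulate qty on a matching id, else keep the item
def pvPartStep (iid : Int) (s : Int × List (List (String × Int))) (it : List (String × Int)) :
    Int × List (List (String × Int)) :=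
  match (PySem.Dict.mk it).get? "item_id" with
  | none => s   -- KeyError in Python; excluded by Pre_
  | some j =>
    if j == iid then (s.1 + (PySem.Dict.mk it).getD "quantity" 1, s.2)
    else (s.1, s.2 ++ [it])

-- one iteration of B's while body: (qty, rest) from scanning pending
def pvPass (iid : Int) (pending : List (List (String × Int))) : Int × List (List (String × Int)) :=
  pending.foldl (pvPartStep iid) (0, [])

-- termination bound for the while loop (cited by pvWhile's decreasing_by)
lemma pvPartStep_foldl_len (iid : Int) (l : List (List (String × Int)))
    (s : Int × List (List (String × Int))) :
    (l.foldl (pvPartStep iid) s).2.length ≤ s.2.length + l.length := by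
  induction l generalizing s with
  | nil => simp
  | cons x r ih =>
    refine le_trans (ih _) ?_
    unfold pvPartStep
    cases (PySem.Dict.mk x).get? "item_id" with
    | none => simp
    | some j =>
      by_cases hj : (j == iid) = true <;> simp [hj] <;> omega

-- B's while loop: extract the first id's whole group, recurse on the remainder
def pvWhile : List (List (String × Int)) → List (List (String × Int))
  | [] => []
  | it :: rest =>
    match h : (PySem.Dict.mk it).get? "item_id" with
    | none => []   -- KeyError in Python; excluded by Pre_
    | some iid =>
      let p := pvPass iid (it :: rest)
      [("item_id", iid), ("quantity", p.1)] :: pvWhile p.2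
  termination_by pending => pending.length
  decreasing_by
    show (pvPass iid (it :: rest)).2.length < (it :: rest).length
    have : (pvPass iid (it :: rest)).2 = (rest.foldl (pvPartStep iid) (0 + (PySem.Dict.mk it).getD "quantity" 1, ([] : List (List (String × Int))))).2 := by
      simp [pvPass, List.foldl_cons, pvPartStep, h]
    rw [this]
    have := pvPartStep_foldl_len iid rest (0 + (PySem.Dict.mk it).getD "quantity" 1, ([] : List (List (String × Int))))
    simp at this ⊢
    omega

def dedup_items_py_alt (items : List (List (String × Int))) : List (List (String × Int)) :=
  pvWhile items

-- ===== PRECONDITION & SPEC =====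
-- Pre_ excludes items lacking an "item_id" key, on which both Pythons raise KeyError.
def Pre_dedup_items_py (items : List (List (String × Int))) : Prop :=
  (items.all (fun it => it.any (fun p => p.1 == "item_id"))) = true
instance (items : List (List (String × Int))) : Decidable (Pre_dedup_items_py items) := by
  unfold Pre_dedup_items_py; infer_instance
def pvWitness_dedup_items_py : (List (List (String × Int))) :=
  [[("item_id", 1), ("quantity", 2)], [("item_id", 1)], [("item_id", 3), ("quantity", 4)]]

def Spec_dedup_items_py (items : List (List (String × Int))) (out : List (List (String × Int))) : Prop := out = dedup_items_py_alt items
instance (items : List (List (String × Int))) (out : List (List (String × Int))) : Decidable (Spec_dedup_items_py items out) := by unfold Spec_dedup_items_py; infer_instance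

-- ===== CLAIM (what is proved, stated in full; the proofs are below) =====
def Claim_equal_dedup_items_py : Prop := ∀ (items : List (List (String × Int))), Dom_dedup_items_py items → Pre_dedup_items_py items → Spec_dedup_items_py items (dedup_items_py items)

-- ===== LEMMAS AND PROOFS =====

-- the id of an entry, and its quantity with default 1
def pvId (it : List (String × Int)) : Option Int := (PySem.Dict.mk it).get? "item_id"
def pvQ (it : List (String × Int)) : Int := (PySem.Dict.mk it).getD "quantity" 1

-- first-occurrence order of the ids of p
def pvK : List (List (String × Int)) → List Int
  | [] => []
  | it :: rest =>
    match pvId it with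
    | none => pvK rest
    | some iid => iid :: (pvK rest).filter (fun k => !(k == iid))

-- total quantity of id k over p
def pvT (k : Int) : List (List (String × Int)) → Int
  | [] => 0
  | it :: rest => (if pvId it == some k then pvQ it else 0) + pvT k rest

-- canonical result both programs compute
def pvCanon (p : List (List (String × Int))) : List (List (String × Int)) :=
  (pvK p).map (fun k => [("item_id", k), ("quantity", pvT k p)])

def pvKeep (iid : Int) (x : List (String × Int)) : Bool :=
  (pvId x).any (fun j => !(j == iid))

lemma pvT_append (k : Int) (p : List (List (String × Int))) (it : List (String × Int)) :
    pvT k (p ++ [it]) = pvT k p + (if pvId it == some k then pvQ it else 0) := by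
  induction p with
  | nil => simp [pvT]
  | cons x r ih => simp only [List.cons_append, pvT, ih]; ring

lemma pvT_zero_of_not_mem (k : Int) (p : List (List (String × Int))) (h : k ∉ pvK p) :
    pvT k p = 0 := by
  induction p with
  | nil => rfl
  | cons x r ih =>
    unfold pvK at h
    unfold pvT
    cases hx : pvId x with
    | none => simp [hx] at h ⊢; exact ih h
    | some j =>
      simp only [hx] at h ⊢
      have hkj : k ≠ j := by rintro rfl; exact h (List.mem_cons_self)
      have hkr : k ∉ pvK r := by
        intro hk
        exact h (List.mem_cons_of_mem _ (List.mem_filter.2 ⟨hk, by simp [hkj]⟩))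
      simp [Ne.symm hkj, ih hkr]

lemma pvK_append (p : List (List (String × Int))) (it : List (String × Int)) :
    pvK (p ++ [it]) =
      match pvId it with
      | none => pvK p
      | some iid => if iid ∈ pvK p then pvK p else pvK p ++ [iid] := by
  induction p with
  | nil =>
    cases h : pvId it <;> simp [pvK, h]
  | cons x r ih =>
    cases hit : pvId it with
    | none =>
      simp only [hit] at ih ⊢
      unfold pvK
      cases hx : pvId x <;> simp [hx, ih]
    | some iid =>
      simp only [hit] at ih ⊢
      show pvK ((x :: r) ++ [it]) = _
      unfold pvK
      cases hx : pvId x with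
      | none =>
        simpa [pvK, hx, List.cons_append] using ih
      | some jx =>
        simp only [List.cons_append, pvK, hx] at ih ⊢
        rw [ih]
        by_cases hj : iid = jx
        · subst hj
          by_cases hmem : iid ∈ pvK r <;>
            simp [hmem, List.filter_append, List.mem_filter]
        · by_cases hmem : iid ∈ pvK r <;>
            simp [hmem, hj, List.filter_append, List.mem_filter]

lemma pvK_filter (iid : Int) (p : List (List (String × Int))) :
    pvK (p.filter (pvKeep iid)) = (pvK p).filter (fun k => !(k == iid)) := by
  induction p with
  | nil => rfl
  | cons x r ih =>
    cases hx : pvId x with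
    | none => simp [List.filter_cons, pvKeep, hx, pvK, ih]
    | some j =>
      by_cases hj : j = iid
      · subst hj
        simp [List.filter_cons, pvKeep, hx, pvK, ih, List.filter_filter]
      · simp only [List.filter_cons, pvKeep, hx, Option.any_some]
        have hj' : (!(j == iid)) = true := by simp [hj]
        simp only [hj', if_true, pvK, hx, pvKeep, ih]
        simp [List.filter_cons, hj', List.filter_filter, Bool.and_comm]

lemma pvT_filter (iid k : Int) (hk : k ≠ iid) (p : List (List (String × Int))) :
    pvT k (p.filter (pvKeep iid)) = pvT k p := by
  induction p with
  | nil => rfl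
  | cons x r ih =>
    cases hx : pvId x with
    | none => simp [List.filter_cons, pvKeep, hx, pvT, ih]
    | some j =>
      by_cases hj : j = iid
      · subst hj
        have hjk : (some j == some k) = false := by
          simp only [beq_eq_false_iff_ne, ne_eq, Option.some.injEq]
          exact fun h => hk h.symm
        simp [List.filter_cons, pvKeep, hx, pvT, ih, hjk]
      · simp [List.filter_cons, pvKeep, hx, pvT, ih, hj]

-- B's partition pass, characterised
lemma pvPass_eq (iid : Int) (p : List (List (String × Int))) :
    pvPass iid p = (pvT iid p, p.filter (pvKeep iid)) := by
  suffices h : ∀ (s : Int × List (List (String × Int))),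
      p.foldl (pvPartStep iid) s = (s.1 + pvT iid p, s.2 ++ p.filter (pvKeep iid)) by
    simpa [pvPass] using h (0, [])
  induction p with
  | nil => intro s; simp [pvT]
  | cons x r ih =>
    intro s
    simp only [List.foldl_cons, List.filter_cons, ih]
    cases hx : pvId x with
    | none =>
      have hstep : pvPartStep iid s x = s := by
        simp only [pvId] at hx
        simp [pvPartStep, hx]
      rw [hstep]
      simp [pvT, pvKeep, hx]
    | some j =>
      by_cases hj : j = iid
      · subst hj
        have hstep : pvPartStep j s x = (s.1 + pvQ x, s.2) := by
          simp only [pvId] at hx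
          simp [pvPartStep, hx, pvQ]
        rw [hstep]
        simp [pvT, pvKeep, hx, pvQ, add_assoc]
      · have hstep : pvPartStep iid s x = (s.1, s.2 ++ [x]) := by
          simp only [pvId] at hx
          simp [pvPartStep, hx, hj]
        rw [hstep]
        have hjk : (some j == some iid) = false := by simp [hj]
        simp [pvT, pvKeep, hx, hjk, hj]

lemma pvId_some_of_any (it : List (String × Int))
    (h : (it.any (fun q => q.1 == "item_id")) = true) : ∃ j, pvId it = some j := by
  induction it with
  | nil => simp at h
  | cons q r ih =>
    obtain ⟨k, v⟩ := q
    by_cases hq : (k == "item_id") = true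
    · exact ⟨v, by simp [pvId, PySem.Dict.get?_mk_cons, hq]⟩
    · simp only [List.any_cons, hq, Bool.false_or] at h
      obtain ⟨j, hj⟩ := ih h
      refine ⟨j, ?_⟩
      simpa [pvId, PySem.Dict.get?_mk_cons, hq] using hj

lemma pre_filter (p : List (List (String × Int))) (hp : Pre_dedup_items_py p)
    (pred : List (String × Int) → Bool) : Pre_dedup_items_py (p.filter pred) := by
  unfold Pre_dedup_items_py at *
  rw [List.all_eq_true] at *
  exact fun x hx => hp x (List.mem_filter.1 hx).1

-- B's loop computes the canonical result (on Pre_ inputs)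
lemma pvWhile_eq (p : List (List (String × Int))) (hp : Pre_dedup_items_py p) :
    pvWhile p = pvCanon p := by
  generalize hn : p.length = n
  induction n using Nat.strong_induction_on generalizing p with
  | _ n ihn =>
    cases p with
    | nil => rw [pvWhile]; rfl
    | cons it rest =>
      have hany : (it.any (fun q => q.1 == "item_id")) = true := by
        have := (List.all_eq_true.1 hp) it List.mem_cons_self
        simpa using this
      obtain ⟨iid, hid⟩ := pvId_some_of_any it hany
      rw [pvWhile]
      split
      · next heq => rw [pvId] at hid; rw [heq] at hid; simp at hid
      · next j heq =>
        rw [pvId] at hid; rw [heq] at hid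
        obtain rfl : iid = j := by simpa using hid.symm
        have hid' : pvId it = some iid := heq
        have hpass : pvPass iid (it :: rest) = (pvT iid (it :: rest), rest.filter (pvKeep iid)) := by
          rw [pvPass_eq]
          have hk0 : pvKeep iid it = false := by simp [pvKeep, hid']
          rw [List.filter_cons, hk0]
          simp
        rw [hpass]
        show ([("item_id", iid), ("quantity", pvT iid (it :: rest))] : List (String × Int)) ::
            pvWhile (rest.filter (pvKeep iid)) = pvCanon (it :: rest)
        have hpre' : Pre_dedup_items_py (rest.filter (pvKeep iid)) := by
          refine pre_filter rest ?_ _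
          unfold Pre_dedup_items_py at hp ⊢
          rw [List.all_eq_true] at hp ⊢
          exact fun x hx => hp x (List.mem_cons_of_mem _ hx)
        have hlen : (rest.filter (pvKeep iid)).length < n := by
          have := List.length_filter_le (pvKeep iid) rest
          simp at hn
          omega
        rw [ihn _ hlen _ hpre' rfl]
        unfold pvCanon
        have hK : pvK (it :: rest) = iid :: (pvK rest).filter (fun k => !(k == iid)) := by
          simp only [pvK, hid']
        rw [hK, pvK_filter, List.map_cons]
        congr 1
        refine List.map_congr_left ?_
        intro k hk
        have hkne : k ≠ iid := by
          have := (List.mem_filter.1 hk).2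
          simpa using this
        have hkne' : ¬ iid = k := fun h => hkne h.symm
        have hT : pvT k (it :: rest) = pvT k rest := by
          simp [pvT, hid', hkne']
        rw [pvT_filter iid k hkne, hT]

-- A's fold, characterised: the merged dict is pvK/pvT in map form
def pvInner (k v : Int) : PySem.Dict String Int :=
  PySem.Dict.mk [("item_id", k), ("quantity", v)]

lemma pvInner_bump (k v q : Int) :
    (pvInner k v).modify "quantity" 0 (· + q) = pvInner k (v + q) := by
  simp [pvInner, PySem.Dict.modify, PySem.Dict.insert, PySem.Dict.getD,
        PySem.Dict.get?, PySem.Dict.contains]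

lemma get?_mapform (ks : List Int) (f : Int → PySem.Dict String Int) (x : Int) (hx : x ∈ ks) :
    (PySem.Dict.mk (ks.map (fun k => (k, f k)))).get? x = some (f x) := by
  induction ks with
  | nil => simp at hx
  | cons k ks ih =>
    rw [List.map_cons, PySem.Dict.get?_mk_cons]
    by_cases hk : k = x
    · subst hk; simp
    · have : (k == x) = false := by simp [hk]
      have hxks : x ∈ ks := by
        rcases List.mem_cons.1 hx with h | h
        · exact absurd h.symm hk
        · exact h
      rw [this]
      simp only [Bool.false_eq_true, if_false]
      exact ih hxks

lemma contains_mapform (ks : List Int) (f : Int → PySem.Dict String Int) (x : Int) :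
    (PySem.Dict.mk (ks.map (fun k => (k, f k)))).contains x = decide (x ∈ ks) := by
  simp [PySem.Dict.contains, List.any_map, Function.comp_def, List.any_beq']

lemma pvFoldA_eq (p : List (List (String × Int))) :
    p.foldl
      (fun m it =>
        match (PySem.Dict.mk it).get? "item_id" with
        | none => m
        | some iid =>
          if m.contains iid then
            m.modify iid PySem.Dict.empty
              (fun d => d.modify "quantity" 0 (· + (PySem.Dict.mk it).getD "quantity" 1))
          else
            m.insert iid
              (PySem.Dict.mk [("item_id", iid), ("quantity", (PySem.Dict.mk it).getD "quantity" 1)]))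
      PySem.Dict.empty
    = PySem.Dict.mk ((pvK p).map (fun k => (k, pvInner k (pvT k p)))) := by
  induction p using List.reverseRecOn with
  | nil => rfl
  | append_singleton p it ih =>
    rw [List.foldl_append, List.foldl_cons, List.foldl_nil, ih]
    cases hid : (PySem.Dict.mk it).get? "item_id" with
    | none =>
      simp only [hid]
      have hK : pvK (p ++ [it]) = pvK p := by rw [pvK_append, pvId, hid]
      rw [hK]
      congr 1
      refine (List.map_congr_left ?_).symm
      intro k _
      rw [pvT_append, pvId, hid]
      simp
    | some iid =>
      simp only [hid]
      have hQ : (PySem.Dict.mk it).getD "quantity" 1 = pvQ it := rfl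
      by_cases hmem : iid ∈ pvK p
      · have hc : (PySem.Dict.mk ((pvK p).map (fun k => (k, pvInner k (pvT k p))))).contains iid = true := by
          rw [contains_mapform]; simpa using hmem
        simp only [hc, if_true]
        have hg : (PySem.Dict.mk ((pvK p).map (fun k => (k, pvInner k (pvT k p))))).getD iid PySem.Dict.empty
            = pvInner iid (pvT iid p) := by
          rw [PySem.Dict.getD_eq_get?_getD, get?_mapform _ _ _ hmem]; rfl
        rw [PySem.Dict.modify, hg, hQ, pvInner_bump]
        apply PySem.Dict.ext
        rw [PySem.Dict.items_insert_of_contains _ _ hc]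
        have hK : pvK (p ++ [it]) = pvK p := by
          rw [pvK_append, pvId, hid]; simp [hmem]
        show ((pvK p).map (fun k => (k, pvInner k (pvT k p)))).map
            (fun pr => if pr.1 == iid then (iid, pvInner iid (pvT iid p + pvQ it)) else pr)
          = (pvK (p ++ [it])).map (fun k => (k, pvInner k (pvT k (p ++ [it]))))
        rw [hK, List.map_map]
        refine List.map_congr_left ?_
        intro k _
        rw [pvT_append k p it, pvId, hid]
        by_cases hk : k = iid
        · subst hk; simp
        · have h1 : (k == iid) = false := by simp [hk]
          have h2 : (some iid == some k) = false := by
            simp only [beq_eq_false_iff_ne, ne_eq, Option.some.injEq]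
            exact fun h => hk h.symm
          simp [h2, hk]
      · have hc : (PySem.Dict.mk ((pvK p).map (fun k => (k, pvInner k (pvT k p))))).contains iid = false := by
          rw [contains_mapform]; simpa using hmem
        rw [hc]
        simp only [Bool.false_eq_true, if_false]
        apply PySem.Dict.ext
        rw [PySem.Dict.items_insert_of_not_contains _ _ hc]
        have hK : pvK (p ++ [it]) = pvK p ++ [iid] := by
          rw [pvK_append, pvId, hid]; simp [hmem]
        show (pvK p).map (fun k => (k, pvInner k (pvT k p)))
              ++ [(iid, PySem.Dict.mk [("item_id", iid), ("quantity", (PySem.Dict.mk it).getD "quantity" 1)])]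
          = (pvK (p ++ [it])).map (fun k => (k, pvInner k (pvT k (p ++ [it]))))
        rw [hK, List.map_append]
        congr 1
        · refine (List.map_congr_left ?_).symm
          intro k hk
          have hkne : k ≠ iid := fun h => hmem (h ▸ hk)
          rw [pvT_append k p it, pvId, hid]
          have h2 : (some iid == some k) = false := by
            simp only [beq_eq_false_iff_ne, ne_eq, Option.some.injEq]
            exact fun h => hkne h.symm
          simp [h2]
        · have hT : pvT iid (p ++ [it]) = pvQ it := by
            rw [pvT_append, pvId, hid, pvT_zero_of_not_mem _ _ hmem]
            simp
          simp [hT, pvInner, hQ]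

-- ===== VERDICT (by name: the statement is the Claim_ definition above) =====
theorem dedup_items_py_spec : Claim_equal_dedup_items_py := by
  intro items _ hpre
  show dedup_items_py items = dedup_items_py_alt items
  unfold dedup_items_py dedup_items_py_alt
  rw [pvFoldA_eq, pvWhile_eq items hpre]
  simp [pvCanon, pvInner, PySem.Dict.values, List.map_map, Function.comp]
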